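-- pv_equiv track=rewrite | github.com/DouglasChirinos/python_2 | hack_5.py | fn_hack_5
-- ===== SOURCE A (Python) =====
-- def fn_hack_5(s):
--     result = s
--     if len(result)>2:
--         k = True
--         salto = 3
--         xchar = '-'
--         xvcl = 'aeiou'
--         while salto < len(result)+1:
--             if k: # unica vez
--                 k = False
--                 ctrl = result[salto-1:salto]
--                 result = result[:salto-1]+ xchar + result[salto:] # remplazo
--             else:
--                 if not ctrl in xvcl: # es consonante
--                     ctrl = result[salto-1:salto] # control de insercion o remplazo
--                     result = result[:salto-1]+ xchar + result[salto:]  # remplazar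
--                 else: # es vocal
--                     ctrl = result[salto-1:salto] # control de insercion o remplazo
--                     result = result[:salto-1]+ xchar + result[salto-1:]  # insertar
--             salto = salto + 3
--     return result
-- ===== SOURCE B (Python) =====
-- def fn_hack_5(s):
--     n = len(s)
--     if n <= 2:
--         return s
--     out = []
--     i = 0
--     ins = False  # insert before the stride char if the previous stride char was a vowel
--     while n - i >= 3:
--         out.append(s[i])
--         out.append(s[i + 1])
--         c = s[i + 2]
--         out.append('-')
--         if ins:
--             i += 2   # insertion: c stays in the stream
--         else:
--             i += 3   # replacement: c is dropped
--         ins = c in 'aeiou'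
--     return ''.join(out) + s[i:]
-- ===== Notes on version B (the rewrite author's own statement) =====
-- stated objective: faster
-- what changed: A rebuilds the whole string by slicing and concatenation at every stride-3 step; B makes one forward pass over the fixed source, appending two copied characters and a dash per step and advancing a read index by 2 (vowel: insert) or 3 (consonant: replace).
import Mathlib
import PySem

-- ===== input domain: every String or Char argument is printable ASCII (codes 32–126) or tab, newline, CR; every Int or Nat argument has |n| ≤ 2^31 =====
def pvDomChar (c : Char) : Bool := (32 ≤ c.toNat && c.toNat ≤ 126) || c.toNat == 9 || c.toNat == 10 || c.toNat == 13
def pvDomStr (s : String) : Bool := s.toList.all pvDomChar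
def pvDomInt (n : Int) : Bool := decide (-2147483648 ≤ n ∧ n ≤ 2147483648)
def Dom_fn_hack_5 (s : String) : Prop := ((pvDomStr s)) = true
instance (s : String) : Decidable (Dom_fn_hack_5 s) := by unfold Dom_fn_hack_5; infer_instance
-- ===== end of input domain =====

-- B replaces A's quadratic slice-and-rebuild while loop by a single forward pass that
-- streams characters into an output buffer (objective: faster, asymptotic).

-- ===== PORT A =====
-- A's while loop; salto stays ≥ 3, so every slice bound is nonnegative and
-- result[a:b] / result[a:] / result[:b] are ported exactly as drop/take.
-- ctrl is the one-character slice result[salto-1:salto]; Python's `ctrl in xvcl`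
-- is substring containment, ported as the infix relation `<:+:`.
-- fuel is a totality guard only: each iteration shrinks result.length+1-salto by ≥ 2,
-- so fuel = len(s) is never exhausted; on exhaustion the loop-exit value is returned.
def fnHack5LoopA : Nat → List Char → Nat → Bool → List Char → List Char
  | 0, result, _, _, _ => result
  | fuel+1, result, salto, k, ctrl =>
    if salto < result.length + 1 then
      if k then
        fnHack5LoopA fuel (result.take (salto-1) ++ '-' :: result.drop salto) (salto+3) false
          ((result.drop (salto-1)).take 1)
      else
        if ¬ (ctrl <:+: ['a','e','i','o','u']) then
          fnHack5LoopA fuel (result.take (salto-1) ++ '-' :: result.drop salto) (salto+3) false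
            ((result.drop (salto-1)).take 1)
        else
          fnHack5LoopA fuel (result.take (salto-1) ++ '-' :: result.drop (salto-1)) (salto+3) false
            ((result.drop (salto-1)).take 1)
    else result

def fn_hack_5 (s : String) : String :=
  if s.toList.length > 2 then String.ofList (fnHack5LoopA s.toList.length s.toList 3 true []) else s

-- ===== PORT B =====
-- Source B's single pass: out accumulates, i is the read index into the fixed source;
-- s[i] etc. are in range whenever read (guard n-i ≥ 3), ported as getD.
-- fuel is a totality guard only: i advances by ≥ 2 per iteration, so fuel = len(s)
-- is never exhausted; on exhaustion the loop-exit value is returned.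
def fnHack5LoopB : Nat → List Char → List Char → Nat → Bool → List Char
  | 0, s, out, i, _ => out ++ s.drop i
  | fuel+1, s, out, i, ins =>
    if s.length - i ≥ 3 then
      fnHack5LoopB fuel s (out ++ [s.getD i ' ', s.getD (i+1) ' ', '-'])
        (if ins then i+2 else i+3)
        (['a','e','i','o','u'].contains (s.getD (i+2) ' '))
    else out ++ s.drop i

def fn_hack_5_alt (s : String) : String :=
  if s.toList.length ≤ 2 then s else String.ofList (fnHack5LoopB s.toList.length s.toList [] 0 false)

-- ===== PRECONDITION & SPEC =====
def Spec_fn_hack_5 (s : String) (out : String) : Prop := out = fn_hack_5_alt s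
instance (s : String) (out : String) : Decidable (Spec_fn_hack_5 s out) := by unfold Spec_fn_hack_5; infer_instance

-- ===== CLAIM (what is proved, stated in full; the proofs are below) =====
def Claim_equal_fn_hack_5 : Prop := ∀ (s : String), Dom_fn_hack_5 s → Spec_fn_hack_5 s (fn_hack_5 s)

-- ===== LEMMAS AND PROOFS =====

-- reference recursion on the unread suffix: what both loops compute past the finished prefix
def fnHack5Tail : List Char → Bool → List Char
  | a :: b :: c :: rest, ins =>
      a :: b :: '-' :: (if ins then fnHack5Tail (c :: rest) (['a','e','i','o','u'].contains c)
                        else fnHack5Tail rest (['a','e','i','o','u'].contains c))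
  | tail, _ => tail
termination_by t _ => t.length

theorem tail_short (t : List Char) (ins : Bool) (h : t.length < 3) : fnHack5Tail t ins = t := by
  match t with
  | [] => simp [fnHack5Tail]
  | [a] => simp [fnHack5Tail]
  | [a, b] => simp [fnHack5Tail]
  | a :: b :: c :: r => exact absurd h (by simp)

theorem loopB_eq (fuel : Nat) : ∀ (s out : List Char) (i : Nat) (ins : Bool),
    s.length - i ≤ fuel →
    fnHack5LoopB fuel s out i ins = out ++ fnHack5Tail (s.drop i) ins := by
  induction fuel with
  | zero =>
      intro s out i ins hf
      rw [fnHack5LoopB, tail_short _ _ (by simp; omega)]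
  | succ n ih =>
      intro s out i ins hf
      rw [fnHack5LoopB]
      by_cases h : s.length - i ≥ 3
      · rw [if_pos h]
        obtain ⟨a, b, c, rest, hd⟩ : ∃ a b c rest, s.drop i = a :: b :: c :: rest := by
          have hl : (s.drop i).length ≥ 3 := by simp; omega
          match hm : s.drop i with
          | a :: b :: c :: rest => exact ⟨a, b, c, rest, rfl⟩
          | [] | [_] | [_, _] => rw [hm] at hl; simp at hl
        have gk : ∀ (k : Nat) (x : Char), (a :: b :: c :: rest)[k]? = some x → s.getD (i+k) ' ' = x := by
          intro k x hx
          have h1 : (s.drop i)[k]? = s[i+k]? := by simp [List.getElem?_drop]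
          rw [hd, hx] at h1
          simp [List.getD, ← h1]
        have g0 : s.getD i ' ' = a := by simpa using gk 0 a rfl
        have g1 : s.getD (i+1) ' ' = b := gk 1 b rfl
        have g2 : s.getD (i+2) ' ' = c := gk 2 c rfl
        have d2 : s.drop (i+2) = c :: rest := by
          rw [← List.drop_drop, hd]; rfl
        have d3 : s.drop (i+3) = rest := by
          rw [← List.drop_drop, hd]; rfl
        cases ins with
        | true =>
            rw [if_pos rfl, ih s _ (i+2) _ (by omega), hd, g0, g1, g2, d2]
            simp [fnHack5Tail]
        | false =>
            rw [if_neg (by simp), ih s _ (i+3) _ (by omega), hd, g0, g1, g2, d3]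
            simp [fnHack5Tail]
      · rw [if_neg h, tail_short _ _ (by simp; omega)]

theorem loopA_eq (fuel : Nat) : ∀ (tail out ctrl : List Char),
    tail.length ≤ fuel →
    fnHack5LoopA fuel (out ++ tail) (out.length + 3) false ctrl
      = out ++ fnHack5Tail tail (decide (ctrl <:+: ['a','e','i','o','u'])) := by
  induction fuel with
  | zero =>
      intro tail out ctrl hf
      rw [fnHack5LoopA, tail_short _ _ (by omega)]
  | succ n ih =>
      intro tail out ctrl hf
      rw [fnHack5LoopA]
      by_cases h3 : 3 ≤ tail.length
      · have hguard : out.length + 3 < (out ++ tail).length + 1 := by simp; omega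
        rw [if_pos hguard]
        match tail, h3, hf with
        | a :: b :: c :: rest, _, hf =>
          have htake : (out ++ a :: b :: c :: rest).take (out.length + 3 - 1) = out ++ [a, b] := by
            have : out.length + 3 - 1 = out.length + 2 := by omega
            rw [this]; simp [List.take_append]
          have hdropm : (out ++ a :: b :: c :: rest).drop (out.length + 3 - 1) = c :: rest := by
            have : out.length + 3 - 1 = out.length + 2 := by omega
            rw [this]; simp [List.drop_append]
          have hdrop : (out ++ a :: b :: c :: rest).drop (out.length + 3) = rest := by
            simp [List.drop_append]
          simp only [Bool.false_eq_true, if_false, htake, hdropm, hdrop]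
          by_cases hv : ctrl <:+: ['a','e','i','o','u']
          · -- vowel: insert
            rw [if_neg (by simpa using hv)]
            have heq : out ++ [a, b] ++ '-' :: c :: rest = (out ++ [a, b, '-']) ++ (c :: rest) := by
              simp
            have hlen' : out.length + 3 + 3 = (out ++ [a, b, '-']).length + 3 := by simp
            rw [heq, hlen', List.take_one, ih (c :: rest) (out ++ [a, b, '-']) _ (by simp at hf ⊢; omega)]
            simp [fnHack5Tail, hv, List.singleton_infix_iff]
          · -- consonant: replace
            rw [if_pos (by simpa using hv)]
            have heq : out ++ [a, b] ++ '-' :: rest = (out ++ [a, b, '-']) ++ rest := by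
              simp
            have hlen' : out.length + 3 + 3 = (out ++ [a, b, '-']).length + 3 := by simp
            rw [heq, hlen', List.take_one, ih rest (out ++ [a, b, '-']) _ (by simp at hf ⊢; omega)]
            simp [fnHack5Tail, hv, List.singleton_infix_iff]
      · have hguard : ¬ (out.length + 3 < (out ++ tail).length + 1) := by simp; omega
        rw [if_neg hguard, tail_short _ _ (by omega)]

-- ===== VERDICT (by name: the statement is the Claim_ definition above) =====
theorem fn_hack_5_spec : Claim_equal_fn_hack_5 := by
  intro s _
  unfold Spec_fn_hack_5 fn_hack_5 fn_hack_5_alt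
  by_cases h : s.toList.length > 2
  · rw [if_pos h, if_neg (by omega)]
    match hm : s.toList, h with
    | a :: b :: c :: rest, _ =>
      -- A's first (k = true) iteration, then the shared tail recursion
      have hL : (a :: b :: c :: rest).length = rest.length + 3 := by simp
      rw [hL, fnHack5LoopA, if_pos (by simp), if_pos rfl]
      have e1 : ((a :: b :: c :: rest).take (3 - 1) ++
          '-' :: (a :: b :: c :: rest).drop 3 : List Char) = [a, b, '-'] ++ rest := by rfl
      have e2 : (((a :: b :: c :: rest).drop (3 - 1)).take 1 : List Char) = [c] := by rfl
      rw [e1, e2]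
      have : (3 + 3 : Nat) = ([a, b, '-'] : List Char).length + 3 := by rfl
      rw [this, loopA_eq (rest.length + 2) rest [a, b, '-'] [c] (by omega)]
      rw [loopB_eq _ _ _ _ _ (by simp)]
      simp [fnHack5Tail, List.singleton_infix_iff]
  · rw [if_neg h, if_pos (by omega)]
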